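-- pv_equiv track=rewrite | github.com/MaxGhi8/LeetCode_sol | python/LeetCode2359.py | BFS
-- ===== SOURCE A (Python) =====
-- def BFS(edges, u):
--     n = len(edges)
--     dist = [-1]*n
--     dist[u] = 0
--     while dist[edges[u]] == -1:
--         v = edges[u]
--         if v == -1:
--             break
--         dist[v] = dist[u] + 1
--         u = v
--
--     return dist
-- ===== SOURCE B (Python) =====
-- def BFS(edges, u):
--     n = len(edges)
--     # Walk up to n + 1 blind steps (a repeat-free walk visits at most n nodes),
--     # collecting the orbit of u; repeats past the first one are harmless.
--     orbit = []
--     cur = u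
--     for _ in range(n + 1):
--         if cur == -1:
--             break
--         orbit.append(cur)
--         cur = edges[cur]
--     # A node's distance is the index of its first occurrence along the orbit.
--     dist = [-1] * n
--     for i, node in enumerate(orbit):
--         if dist[node] == -1:
--             dist[node] = i
--     return dist
-- ===== Notes on version B (the rewrite author's own statement) =====
-- stated objective: alternative
-- what changed: B walks a fixed bound of n+1 blind steps collecting the orbit with no visited check at all, then assigns each node the index of its first occurrence along the orbit, instead of A's while-loop that detects revisits through the distance array while walking; Pre_ excludes only empty edges and u outside Python's index range [-n,n), on which A raises IndexError before the walk.
-- intended difference: For u = -1 A starts the walk anyway and returns distances measured from the last node via Python's negative-index wraparound, while B treats -1 as the problem's no-node sentinel and returns all -1, the intended reading of the -1 encoding. — e.g. on BFS([0, 0], -1): A returns [1, 0], B returns [-1, -1]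
import Mathlib
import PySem

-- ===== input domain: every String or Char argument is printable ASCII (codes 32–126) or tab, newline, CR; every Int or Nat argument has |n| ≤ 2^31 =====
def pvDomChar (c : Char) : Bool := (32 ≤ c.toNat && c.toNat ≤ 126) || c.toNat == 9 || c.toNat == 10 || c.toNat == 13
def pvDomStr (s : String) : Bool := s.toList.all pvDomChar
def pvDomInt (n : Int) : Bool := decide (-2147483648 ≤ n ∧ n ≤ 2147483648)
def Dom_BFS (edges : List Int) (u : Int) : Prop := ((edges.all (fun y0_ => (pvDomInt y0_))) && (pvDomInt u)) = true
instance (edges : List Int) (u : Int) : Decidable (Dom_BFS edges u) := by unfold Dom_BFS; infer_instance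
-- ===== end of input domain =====

-- B walks a fixed bound of n+1 blind steps collecting the orbit of u (no visited
-- check at all), then assigns each node the index of its first occurrence along the
-- orbit, instead of A's while-loop that detects revisits through the distance array
-- while walking (objective: alternative).

-- ===== PORT A =====
-- A's while loop: fuel (edges.length + 1) bounds the iteration count, which inside
-- Pre_ is at most edges.length (each iteration marks a fresh slot); the `none`
-- branches of pyGet? are Python IndexError, excluded by Pre_.
def BFS_loopA (fuel : Nat) (edges : List Int) (dist : List Int) (u : Int) : List Int :=
  match fuel with
  | 0 => dist
  | f + 1 =>
    match PySem.List.pyGet? edges u with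
    | none => dist                                   -- IndexError (outside Pre_)
    | some e =>
      match PySem.List.pyGet? dist e with
      | none => dist                                 -- IndexError (outside Pre_)
      | some de =>
        if de = -1 then
          if e = -1 then dist
          else
            BFS_loopA f edges
              (PySem.List.pySetD dist e (PySem.List.pyGetD dist u (-1) + 1)) e
        else dist

def BFS (edges : List Int) (u : Int) : List Int :=
  let n := edges.length
  let dist := List.replicate n (-1 : Int)
  let dist := PySem.List.pySetD dist u 0
  BFS_loopA (n + 1) edges dist u

-- ===== PORT B =====
-- Source B's first loop: 'for _ in range(n + 1): if cur == -1: break; orbit.append(cur);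
-- cur = edges[cur]'; the `none` branch is Python IndexError (outside Pre_).
def BFS_orbit (fuel : Nat) (edges : List Int) (cur : Int) : List Int :=
  match fuel with
  | 0 => []
  | f + 1 =>
    if cur = -1 then []
    else
      match PySem.List.pyGet? edges cur with
      | none => [cur]                                -- IndexError (outside Pre_)
      | some nxt => cur :: BFS_orbit f edges nxt

-- Source B's second loop body: 'if dist[node] == -1: dist[node] = i'
def BFS_fillstep (dist : List Int) (p : Int × Int) : List Int :=
  match PySem.List.pyGet? dist p.2 with
  | none => dist                                     -- IndexError (outside Pre_)
  | some dv => if dv = -1 then PySem.List.pySetD dist p.2 p.1 else dist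

def BFS_alt (edges : List Int) (u : Int) : List Int :=
  let n := edges.length
  (PySem.List.enumerate (BFS_orbit (n + 1) edges u) 0).foldl BFS_fillstep
    (List.replicate n (-1 : Int))

-- ===== PRECONDITION & SPEC =====
-- chain safety for Pre_: following the edge chain from s, every read stays inside
-- Python's index range [-n, n) until a -1 terminator (n + 1 steps bound every read
-- the programs perform; a safe cycle keeps the walker in range until the fuel ends)
def BFS_safe (edges : List Int) (fuel : Nat) (s : Int) : Bool :=
  match fuel with
  | 0 => true
  | f + 1 =>
    match PySem.List.pyGet? edges s with
    | none => false
    | some e => if e = -1 then true else BFS_safe edges f e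

-- Pre_ excludes exactly the inputs on which A raises IndexError: empty edges,
-- u outside Python's index range [-n, n), or the edge chain from u reaching an
-- out-of-range entry.
def Pre_BFS (edges : List Int) (u : Int) : Prop :=
  0 < edges.length ∧ -(edges.length : Int) ≤ u ∧ u < edges.length ∧
  BFS_safe edges (edges.length + 1) u = true
instance (edges : List Int) (u : Int) : Decidable (Pre_BFS edges u) := by
  unfold Pre_BFS; infer_instance

def pvWitness_BFS : List Int × Int := ([1, 2, -1, 1], 0)

-- For u = -1, A starts the walk anyway and returns distances measured from the last
-- node via Python's negative-index wraparound, while B treats -1 as the problem's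
-- no-node sentinel and returns all -1; -1 means "no node" in this encoding, so
-- B's reading is the intended one.
def D_BFS (edges : List Int) (u : Int) : Prop := u = -1
instance (edges : List Int) (u : Int) : Decidable (D_BFS edges u) := by
  unfold D_BFS; infer_instance

def Spec_BFS (edges : List Int) (u : Int) (out : List Int) : Prop :=
  ¬ D_BFS edges u → out = BFS_alt edges u
instance (edges : List Int) (u : Int) (out : List Int) : Decidable (Spec_BFS edges u out) := by unfold Spec_BFS; infer_instance

def pvDiffWitness_BFS : List Int × Int := ([0, 0], -1)
def pvDiffWitnessOut_BFS : (List Int) × (List Int) := ([1, 0], [-1, -1])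

-- ===== CLAIM (what is proved, stated in full; the proofs are below) =====
def Claim_unchanged_BFS : Prop := ∀ (edges : List Int) (u : Int), Dom_BFS edges u → Pre_BFS edges u → Spec_BFS edges u (BFS edges u)
def Claim_changed_BFS : Prop := Dom_BFS (pvDiffWitness_BFS.1) (pvDiffWitness_BFS.2) ∧ Pre_BFS (pvDiffWitness_BFS.1) (pvDiffWitness_BFS.2) ∧ D_BFS (pvDiffWitness_BFS.1) (pvDiffWitness_BFS.2) ∧ BFS (pvDiffWitness_BFS.1) (pvDiffWitness_BFS.2) = pvDiffWitnessOut_BFS.1 ∧ BFS_alt (pvDiffWitness_BFS.1) (pvDiffWitness_BFS.2) = pvDiffWitnessOut_BFS.2 ∧ pvDiffWitnessOut_BFS.1 ≠ pvDiffWitnessOut_BFS.2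
def Claim_exact_BFS : Prop := ∀ (edges : List Int) (u : Int), Dom_BFS edges u → Pre_BFS edges u → D_BFS edges u → BFS edges u ≠ BFS_alt edges u

-- ===== LEMMAS AND PROOFS =====

-- Python '%' with a positive divisor, on Int
lemma mod_small (n : Nat) (i : Int) (hn : 0 < n) : PySem.Int.mod i n = i % n :=
  PySem.Int.mod_eq_emod_of_pos (by exact_mod_cast hn)

lemma mod_bounds (n : Nat) (i : Int) (hn : 0 < n) :
    0 ≤ PySem.Int.mod i n ∧ PySem.Int.mod i n < n := by
  rw [mod_small n i hn]
  constructor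
  · exact Int.emod_nonneg i (by omega)
  · exact Int.emod_lt_of_pos i (by omega)

lemma pyIdx?_eq_mod (n : Nat) (i : Int) (hn : 0 < n) (h0 : -(n : Int) ≤ i) (h1 : i < n) :
    PySem.List.pyIdx? n i = some ((PySem.Int.mod i n).toNat) := by
  rw [mod_small n i hn]
  unfold PySem.List.pyIdx?
  by_cases hpos : 0 ≤ i
  · have hid : i % (n : Int) = i := Int.emod_eq_of_lt hpos h1
    rw [if_pos hpos, if_pos h1, hid]
  · have hsh : i % (n : Int) = i + n := by
      have h2 : (i + (n : Int)) % n = i % n := by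
        simpa using Int.add_mul_emod_self_left (a := i) (b := (n : Int)) (c := 1)
      have h3 : (i + (n : Int)) % n = i + n :=
        Int.emod_eq_of_lt (by omega) (by omega)
      omega
    rw [if_neg hpos, if_pos (by omega), hsh]
    simp only [Option.some.injEq]
    omega

lemma mod_idem (n : Nat) (i : Int) (hn : 0 < n) (h0 : 0 ≤ i) (h1 : i < n) :
    PySem.Int.mod i n = i := by
  rw [mod_small n i hn]; exact Int.emod_eq_of_lt h0 h1

lemma mod_neg_one (n : Nat) (hn : 0 < n) : PySem.Int.mod (-1) n = (n : Int) - 1 := by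
  rw [mod_small n (-1) hn]
  have h2 : ((-1 : Int) + n) % n = (-1 : Int) % n := by
    simpa using Int.add_mul_emod_self_left (a := (-1 : Int)) (b := (n : Int)) (c := 1)
  have h3 : ((-1 : Int) + n) % n = -1 + n :=
    Int.emod_eq_of_lt (by omega) (by omega)
  omega

-- index normalization for the three Python indexing primitives (n = xs.length)
lemma pyGet?_mod (xs : List Int) (i : Int) (n : Nat) (hlen : xs.length = n) (hn : 0 < n)
    (h0 : -(n : Int) ≤ i) (h1 : i < n) :
    PySem.List.pyGet? xs i = PySem.List.pyGet? xs (PySem.Int.mod i n) := by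
  subst hlen
  have hb := mod_bounds xs.length i hn
  unfold PySem.List.pyGet?
  rw [pyIdx?_eq_mod _ _ hn h0 h1, pyIdx?_eq_mod _ _ hn (by omega) (by omega),
    mod_idem _ _ hn hb.1 hb.2]

lemma pyGetD_mod (xs : List Int) (i : Int) (d : Int) (n : Nat) (hlen : xs.length = n)
    (hn : 0 < n) (h0 : -(n : Int) ≤ i) (h1 : i < n) :
    PySem.List.pyGetD xs i d = PySem.List.pyGetD xs (PySem.Int.mod i n) d := by
  subst hlen
  have hb := mod_bounds xs.length i hn
  unfold PySem.List.pyGetD PySem.List.pyGet?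
  rw [pyIdx?_eq_mod _ _ hn h0 h1, pyIdx?_eq_mod _ _ hn (by omega) (by omega),
    mod_idem _ _ hn hb.1 hb.2]

lemma pySetD_mod (xs : List Int) (i : Int) (v : Int) (n : Nat) (hlen : xs.length = n)
    (hn : 0 < n) (h0 : -(n : Int) ≤ i) (h1 : i < n) :
    PySem.List.pySetD xs i v = PySem.List.pySetD xs (PySem.Int.mod i n) v := by
  subst hlen
  have hb := mod_bounds xs.length i hn
  unfold PySem.List.pySetD PySem.List.pySet?
  rw [pyIdx?_eq_mod _ _ hn h0 h1, pyIdx?_eq_mod _ _ hn (by omega) (by omega),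
    mod_idem _ _ hn hb.1 hb.2]

lemma pyGet?_eq_some_pyGetD (xs : List Int) (i : Int) (d : Int)
    (h0 : -(xs.length : Int) ≤ i) (h1 : i < xs.length) (hn : 0 < xs.length) :
    PySem.List.pyGet? xs i = some (PySem.List.pyGetD xs i d) := by
  have hb := mod_bounds xs.length i hn
  rw [pyGet?_mod xs i xs.length rfl hn h0 h1, pyGetD_mod xs i d xs.length rfl hn h0 h1]
  rw [PySem.List.pyGet?_eq_some_getElem xs hb.1 (by omega),
      PySem.List.pyGetD_eq_getElem xs d hb.1 (by omega)]

lemma pyGetD_eq_of_pyGet?_some (xs : List Int) (i d x : Int)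
    (h : PySem.List.pyGet? xs i = some x) : PySem.List.pyGetD xs i d = x := by
  simp [PySem.List.pyGetD, h]

lemma pyGetD_eq_of_pyGet?_none (xs : List Int) (i d : Int)
    (h : PySem.List.pyGet? xs i = none) : PySem.List.pyGetD xs i d = d := by
  simp [PySem.List.pyGetD, h]

lemma inRange_of_pyGet?_some (xs : List Int) (i x : Int)
    (h : PySem.List.pyGet? xs i = some x) :
    -(xs.length : Int) ≤ i ∧ i < xs.length := by
  by_contra hc
  have : PySem.List.pyGet? xs i = none := by
    rw [PySem.List.pyGet?_eq_none_iff]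
    intro hir
    exact hc (by unfold PySem.Raise.InRange at hir; omega)
  simp [h] at this

-- proof-side unconditional left-to-right filler; both sides are related to it
def fillFrom (dist : List Int) (k : Int) : List Int → List Int
  | [] => dist
  | x :: xs => fillFrom (PySem.List.pySetD dist x k) (k + 1) xs

lemma length_fillFrom (path : List Int) :
    ∀ (dist : List Int) (k : Int), (fillFrom dist k path).length = dist.length := by
  induction path with
  | nil => intro dist k; simp [fillFrom]
  | cons x xs ih =>
      intro dist k
      simp [fillFrom, ih, PySem.List.length_pySetD]

lemma getD_set_int (dist : List Int) (x j k : Int)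
    (hx0 : 0 ≤ x) (_hx1 : x < dist.length) (hj0 : 0 ≤ j) (hj1 : j < dist.length) :
    PySem.List.pyGetD (PySem.List.pySetD dist x k) j (-1)
      = if j = x then k else PySem.List.pyGetD dist j (-1) := by
  rw [PySem.List.pySetD_of_nonneg _ _ hx0]
  rw [PySem.List.pyGetD_eq_getElem _ _ hj0 (by simpa using hj1),
      PySem.List.pyGetD_eq_getElem _ _ hj0 hj1]
  rw [List.getElem_set]
  by_cases h : j = x
  · simp [h]
  · have : x.toNat ≠ j.toNat := by omega
    simp [this, h]

-- reading j from dist after a (possibly wrapped) write at x: governed by the slots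
lemma getD_set_wrap (n : Nat) (dist : List Int) (x j k : Int)
    (hlen : dist.length = n) (hn : 0 < n)
    (hx0 : -(n : Int) ≤ x) (hx1 : x < n) (hj0 : -(n : Int) ≤ j) (hj1 : j < n) :
    PySem.List.pyGetD (PySem.List.pySetD dist x k) j (-1)
      = if PySem.Int.mod j n = PySem.Int.mod x n then k
        else PySem.List.pyGetD dist j (-1) := by
  have hxb := mod_bounds n x hn
  have hjb := mod_bounds n j hn
  rw [pySetD_mod dist x k n hlen hn hx0 hx1]
  rw [pyGetD_mod (PySem.List.pySetD dist (PySem.Int.mod x n) k) j (-1) n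
    (by rw [PySem.List.length_pySetD, hlen]) hn hj0 hj1]
  rw [getD_set_int dist (PySem.Int.mod x n) (PySem.Int.mod j n) k hxb.1 (by omega)
    hjb.1 (by omega)]
  rw [← pyGetD_mod dist j (-1) n hlen hn hj0 hj1]

lemma getD_fillFrom_not_mem (n : Nat) (path : List Int) :
    ∀ (dist : List Int) (k j : Int),
      dist.length = n → 0 < n →
      (∀ x ∈ path, -(n : Int) ≤ x ∧ x < n) →
      -(n : Int) ≤ j → j < n →
      PySem.Int.mod j n ∉ path.map (fun x => PySem.Int.mod x n) →
      PySem.List.pyGetD (fillFrom dist k path) j (-1) = PySem.List.pyGetD dist j (-1) := by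
  induction path with
  | nil => intro dist k j _ _ _ _ _ _; simp [fillFrom]
  | cons x xs ih =>
      intro dist k j hlen hn hb hj0 hj1 hj
      simp only [List.map_cons, List.mem_cons, not_or] at hj
      have hx := hb x (List.mem_cons_self ..)
      rw [fillFrom, ih _ _ _ (by rw [PySem.List.length_pySetD, hlen]) hn
        (fun y hy => hb y (List.mem_cons_of_mem _ hy)) hj0 hj1 hj.2]
      rw [getD_set_wrap n dist x j k hlen hn hx.1 hx.2 hj0 hj1]
      simp [hj.1]

lemma getD_fillFrom_mem (n : Nat) (path : List Int) :
    ∀ (dist : List Int) (k : Int) (i : Nat) (h : i < path.length),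
      dist.length = n → 0 < n →
      (path.map (fun x => PySem.Int.mod x n)).Nodup →
      (∀ x ∈ path, -(n : Int) ≤ x ∧ x < n) →
      PySem.List.pyGetD (fillFrom dist k path) (path[i]) (-1) = k + i := by
  induction path with
  | nil => intro dist k i h; simp at h
  | cons x xs ih =>
      intro dist k i h hlen hn hnd hb
      have hx := hb x (List.mem_cons_self ..)
      simp only [List.map_cons, List.nodup_cons] at hnd
      match i with
      | 0 =>
        simp only [List.getElem_cons_zero, fillFrom]
        rw [getD_fillFrom_not_mem n xs _ _ _ (by rw [PySem.List.length_pySetD, hlen]) hn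
          (fun y hy => hb y (List.mem_cons_of_mem _ hy)) hx.1 hx.2 hnd.1]
        rw [getD_set_wrap n dist x x k hlen hn hx.1 hx.2 hx.1 hx.2]
        simp
      | i' + 1 =>
        simp only [List.getElem_cons_succ, fillFrom]
        rw [ih _ _ i' (by simpa using h) (by rw [PySem.List.length_pySetD, hlen]) hn hnd.2
          (fun y hy => hb y (List.mem_cons_of_mem _ hy))]
        push_cast; ring

lemma fillFrom_append (path : List Int) :
    ∀ (dist : List Int) (k : Int) (e : Int),
      fillFrom dist k (path ++ [e])
        = PySem.List.pySetD (fillFrom dist k path) e (k + path.length) := by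
  induction path with
  | nil => intro dist k e; simp [fillFrom]
  | cons x xs ih =>
      intro dist k e
      simp only [List.cons_append, fillFrom, ih]
      congr 1
      simp only [List.length_cons]
      push_cast; ring

-- a walk whose slots are all distinct visits at most n slots
lemma nodup_bounded_length (n : Nat) (hn : 0 < n) (path : List Int)
    (hnd : (path.map (fun x => PySem.Int.mod x n)).Nodup) : path.length ≤ n := by
  set slots := path.map (fun x => PySem.Int.mod x n) with hs
  have hb : ∀ s ∈ slots, 0 ≤ s ∧ s < (n : Int) := by
    intro s hsm
    obtain ⟨x, _, rfl⟩ := List.mem_map.mp hsm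
    exact ⟨(mod_bounds n x hn).1, (mod_bounds n x hn).2⟩
  have hmap : (slots.map Int.toNat).Nodup := by
    refine List.Nodup.map_on ?_ hnd
    intro x hx y hy hxy
    have h1 := hb x hx
    have h2 := hb y hy
    omega
  have hsub : slots.map Int.toNat ⊆ List.range n := by
    intro a ha
    obtain ⟨x, hx, rfl⟩ := List.mem_map.mp ha
    have := hb x hx
    simp only [List.mem_range]
    omega
  have hcard : (slots.map Int.toNat).toFinset.card = (slots.map Int.toNat).length :=
    List.toFinset_card_of_nodup hmap
  have hsub' : (slots.map Int.toNat).toFinset ⊆ Finset.range n := by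
    intro a ha
    rw [List.mem_toFinset] at ha
    simpa using hsub ha
  have := Finset.card_le_card hsub'
  simp only [Finset.card_range] at this
  rw [hcard] at this
  simp only [List.length_map, hs, List.length_map] at this
  exact this

-- once the walk has closed on itself, Source B's fill loop is a no-op over the rest
lemma fold_saturated (edges path : List Int) (n : Nat) (hlen : edges.length = n)
    (hn : 0 < n)
    (hb : ∀ x ∈ path, -(n : Int) ≤ x ∧ x < n)
    (hclose : ∀ x ∈ path, ∀ e2, PySem.List.pyGet? edges x = some e2 →
        e2 = -1 ∨ PySem.Int.mod e2 n ∈ path.map (fun y => PySem.Int.mod y n)) :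
    ∀ (f : Nat) (c k : Int) (D : List Int), D.length = n →
      (∀ x ∈ path, PySem.List.pyGetD D x (-1) ≠ -1) →
      (c = -1 ∨ PySem.Int.mod c n ∈ path.map (fun y => PySem.Int.mod y n)) →
      (PySem.List.enumerate (BFS_orbit f edges c) k).foldl BFS_fillstep D = D := by
  intro f
  induction f with
  | zero => intro c k D _ _ _; simp [BFS_orbit, PySem.List.enumerate_nil]
  | succ f ih =>
      intro c k D hD hset hc
      by_cases hc1 : c = -1
      · simp [BFS_orbit, hc1, PySem.List.enumerate_nil]
      · rcases hc with hc | hcs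
        · exact absurd hc hc1
        by_cases hcr : -(n : Int) ≤ c ∧ c < n
        case neg =>
          -- c is an out-of-range value: both the edge read and the dist read miss
          have hEc : PySem.List.pyGet? edges c = none := by
            rw [PySem.List.pyGet?_eq_none_iff]
            intro hir
            exact hcr (by unfold PySem.Raise.InRange at hir; omega)
          have hDc : PySem.List.pyGet? D c = none := by
            rw [PySem.List.pyGet?_eq_none_iff]
            intro hir
            exact hcr (by unfold PySem.Raise.InRange at hir; rw [hD] at hir; omega)
          simp [BFS_orbit, if_neg hc1, hEc, PySem.List.enumerate_cons,
            PySem.List.enumerate_nil, BFS_fillstep, hDc]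
        case pos =>
        obtain ⟨hc0, hc1'⟩ := hcr
        obtain ⟨y, hy, hyc⟩ := List.mem_map.mp hcs
        have hyb := hb y hy
        -- c and y read the same edge entry (same slot)
        have hEcy : PySem.List.pyGet? edges c = PySem.List.pyGet? edges y := by
          rw [pyGet?_mod edges c n hlen hn hc0 hc1',
            pyGet?_mod edges y n hlen hn hyb.1 hyb.2, hyc]
        have hEy : PySem.List.pyGet? edges y
            = some (PySem.List.pyGetD edges y (-1)) := by
          rw [← hlen] at hyb
          exact pyGet?_eq_some_pyGetD edges y (-1) hyb.1 hyb.2 (by omega)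
        set nxt := PySem.List.pyGetD edges y (-1) with hnxt
        have hEc : PySem.List.pyGet? edges c = some nxt := by rw [hEcy, hEy]
        -- c's distance is already assigned (same slot as y)
        have hDcy : PySem.List.pyGetD D c (-1) = PySem.List.pyGetD D y (-1) := by
          rw [pyGetD_mod D c (-1) n hD hn hc0 hc1',
            pyGetD_mod D y (-1) n hD hn hyb.1 hyb.2, hyc]
        have hDc : PySem.List.pyGet? D c = some (PySem.List.pyGetD D c (-1)) := by
          rw [← hD] at hc0 hc1'
          exact pyGet?_eq_some_pyGetD D c (-1) hc0 hc1' (by omega)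
        have hstep : BFS_fillstep D (k, c) = D := by
          simp only [BFS_fillstep, hDc]
          rw [if_neg (by rw [hDcy]; exact hset y hy)]
        simp only [BFS_orbit, if_neg hc1, hEc, PySem.List.enumerate_cons,
          List.foldl_cons, hstep]
        exact ih nxt (k + 1) D hD hset (hclose y hy nxt hEy)

-- main correspondence: A's loop from the walked prefix `path` equals Source B's fill
-- folded over the remaining blind orbit
lemma main_loop (edges : List Int) :
    ∀ (fA : Nat) (fB : Nat) (path : List Int) (hne : path ≠ []),
      (path.map (fun y => PySem.Int.mod y edges.length)).Nodup →
      (∀ x ∈ path, -(edges.length : Int) ≤ x ∧ x < (edges.length : Int)) →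
      (∀ (i : Nat) (h : i + 1 < path.length),
        PySem.List.pyGet? edges (path[i]'(by omega)) = some (path[i + 1]'h)) →
      edges.length + 1 ≤ fA + path.length →
      edges.length + 1 ≤ fB + path.length →
      ∀ e, PySem.List.pyGet? edges (path.getLast hne) = some e →
      BFS_loopA fA edges (fillFrom (List.replicate edges.length (-1 : Int)) 0 path)
          (path.getLast hne)
        = (PySem.List.enumerate (BFS_orbit fB edges e) (path.length : Int)).foldl
            BFS_fillstep (fillFrom (List.replicate edges.length (-1 : Int)) 0 path) := by
  intro fA
  induction fA with
  | zero =>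
      intro fB path hne hnd hb _ hfA _ _ _
      have hn : 0 < edges.length := by
        obtain ⟨x, hx⟩ := List.exists_mem_of_ne_nil path hne
        have := hb x hx
        omega
      have := nodup_bounded_length edges.length hn path hnd
      omega
  | succ fA ih =>
      intro fB path hne hnd hb hchain hfA hfB e hE
      set n := edges.length with hn'
      set u := path.getLast hne with hu
      set D := fillFrom (List.replicate n (-1 : Int)) 0 path with hD
      have hDlen : D.length = n := by simp [hD, length_fillFrom]
      have humem : u ∈ path := List.getLast_mem hne
      have hub := hb u humem
      have hn : 0 < n := by omega
      have hm := nodup_bounded_length n hn path hnd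
      have hmpos : 0 < path.length := List.length_pos_iff.mpr hne
      have hulast : u = path[path.length - 1]'(by omega) := by
        rw [hu]; exact List.getLast_eq_getElem hne
      -- the closure property of the walked prefix, given where its last edge goes
      have hclose : (e = -1 ∨ PySem.Int.mod e n ∈ path.map (fun y => PySem.Int.mod y n)) →
          ∀ x ∈ path, ∀ e2, PySem.List.pyGet? edges x = some e2 →
            e2 = -1 ∨ PySem.Int.mod e2 n ∈ path.map (fun y => PySem.Int.mod y n) := by
        intro he x hx e2 hx2
        obtain ⟨i, hi, rfl⟩ := List.getElem_of_mem hx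
        by_cases hi' : i + 1 < path.length
        · rw [hchain i hi'] at hx2
          refine Or.inr (List.mem_map.mpr ⟨path[i + 1], List.getElem_mem _, ?_⟩)
          rw [Option.some_inj.mp hx2]
        · have hieq : path[i] = u := by
            rw [hulast]
            congr 1
            omega
          rw [hieq, hE] at hx2
          rw [← Option.some_inj.mp hx2]
          exact he
      -- distances already assigned on the prefix are ≥ 0
      have hset : ∀ x ∈ path, PySem.List.pyGetD D x (-1) ≠ -1 := by
        intro x hx
        obtain ⟨i, hi, rfl⟩ := List.getElem_of_mem hx
        rw [hD, getD_fillFrom_mem n path _ 0 i hi (by simp) hn hnd hb]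
        omega
      by_cases he1 : e = -1
      · -- edges[u] = -1: A stops (whatever dist[-1] holds), B's orbit is empty
        subst he1
        have hDneg : PySem.List.pyGet? D (-1)
            = some (PySem.List.pyGetD D (-1) (-1)) := by
          refine pyGet?_eq_some_pyGetD D (-1) (-1) ?_ ?_ ?_ <;> rw [hDlen] <;> omega
        have hBorbit : BFS_orbit fB edges (-1) = [] := by
          cases fB with
          | zero => rfl
          | succ f => simp [BFS_orbit]
        rw [hBorbit]
        simp only [BFS_loopA, hE, hDneg, PySem.List.enumerate_nil, List.foldl_nil]
        split_ifs <;> rfl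
      cases hDeOpt : PySem.List.pyGet? D e with
      | none =>
        -- e is an out-of-range value: A stops at its dist read; B's orbit appends e
        -- once and stops at its edge read, and the fill skips e
        have her : ¬ (-(n : Int) ≤ e ∧ e < n) := by
          intro hir
          rw [PySem.List.pyGet?_eq_none_iff] at hDeOpt
          exact hDeOpt (by unfold PySem.Raise.InRange; omega)
        have hEe : PySem.List.pyGet? edges e = none := by
          rw [PySem.List.pyGet?_eq_none_iff]
          intro hir
          exact her (by unfold PySem.Raise.InRange at hir; omega)
        have hfBpos : 0 < fB := by omega
        obtain ⟨fB', rfl⟩ : ∃ f', fB = f' + 1 := ⟨fB - 1, by omega⟩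
        simp [BFS_loopA, BFS_orbit, hE, hDeOpt, if_neg he1, hEe,
          PySem.List.enumerate_cons, PySem.List.enumerate_nil, BFS_fillstep]
      | some de =>
        have heb := inRange_of_pyGet?_some D e de hDeOpt
        rw [hDlen] at heb
        have hDe : PySem.List.pyGet? D e = some (PySem.List.pyGetD D e (-1)) := by
          refine pyGet?_eq_some_pyGetD D e (-1) ?_ ?_ ?_ <;> rw [hDlen] <;> omega
        by_cases hmem : PySem.Int.mod e n ∈ path.map (fun y => PySem.Int.mod y n)
        · -- revisit: A stops; B's remaining orbit stays inside the prefix, a no-op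
          obtain ⟨y, hy, hyc⟩ := List.mem_map.mp hmem
          have hyb := hb y hy
          have hDey : PySem.List.pyGetD D e (-1) = PySem.List.pyGetD D y (-1) := by
            rw [pyGetD_mod D e (-1) n hDlen hn heb.1 heb.2,
              pyGetD_mod D y (-1) n hDlen hn hyb.1 hyb.2, hyc]
          have hstop : PySem.List.pyGetD D e (-1) ≠ -1 := by
            rw [hDey]; exact hset y hy
          simp only [BFS_loopA, hE, hDe, if_neg hstop]
          exact (fold_saturated edges path n rfl hn hb
            (hclose (Or.inr hmem)) fB e _ D hDlen hset (Or.inr hmem)).symm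
        · -- fresh slot: both sides write path.length at e and continue
          have hDe1 : PySem.List.pyGetD D e (-1) = -1 := by
            rw [hD, getD_fillFrom_not_mem n path _ 0 e (by simp) hn hb heb.1 heb.2 hmem]
            have hebm := mod_bounds n e hn
            rw [pyGetD_mod _ e (-1) n (by simp) hn heb.1 heb.2,
              PySem.List.pyGetD_eq_getElem _ _ hebm.1 (by simp; omega)]
            simp
          have hDu : PySem.List.pyGetD D u (-1) + 1 = (path.length : Int) := by
            rw [hulast, hD,
              getD_fillFrom_mem n path _ 0 _ (by omega) (by simp) hn hnd hb]
            omega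
          have hwrite : PySem.List.pySetD D e (PySem.List.pyGetD D u (-1) + 1)
              = fillFrom (List.replicate n (-1 : Int)) 0 (path ++ [e]) := by
            rw [hDu, fillFrom_append, hD]
            norm_num
          have hfBpos : 0 < fB := by omega
          obtain ⟨fB', rfl⟩ : ∃ f', fB = f' + 1 := ⟨fB - 1, by omega⟩
          have hE2 : PySem.List.pyGet? edges e
              = some (PySem.List.pyGetD edges e (-1)) := by
            refine pyGet?_eq_some_pyGetD edges e (-1) ?_ ?_ ?_ <;> omega
          simp only [BFS_loopA, BFS_orbit, hE, hDe, if_pos hDe1, if_neg he1, hE2,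
            PySem.List.enumerate_cons, List.foldl_cons]
          have hstepB : BFS_fillstep D ((path.length : Int), e)
              = fillFrom (List.replicate n (-1 : Int)) 0 (path ++ [e]) := by
            simp only [BFS_fillstep, hDe, hDe1]
            rw [if_pos trivial, ← hDu, hwrite]
          rw [hstepB, hwrite]
          -- invariants for the extended prefix
          have hne' : path ++ [e] ≠ [] := by simp
          have hnd' : ((path ++ [e]).map (fun y => PySem.Int.mod y n)).Nodup := by
            rw [List.map_append]
            refine hnd.append (by simp) ?_
            intro a ha hb'
            simp only [List.map_cons, List.map_nil, List.mem_singleton] at hb'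
            subst hb'
            exact hmem ha
          have hb' : ∀ x ∈ path ++ [e], -(n : Int) ≤ x ∧ x < (n : Int) := by
            intro x hx
            rcases List.mem_append.mp hx with h | h
            · exact hb x h
            · simp only [List.mem_singleton] at h; subst h; exact ⟨heb.1, heb.2⟩
          have hchain' : ∀ (i : Nat) (hilen : i + 1 < (path ++ [e]).length),
              PySem.List.pyGet? edges ((path ++ [e])[i]'(by omega))
                = some ((path ++ [e])[i + 1]'hilen) := by
            intro i hilen
            simp only [List.length_append, List.length_cons, List.length_nil] at hilen
            by_cases hi' : i + 1 < path.length
            · rw [List.getElem_append_left (by omega), List.getElem_append_left hi']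
              exact hchain i hi'
            · have hi1 : i + 1 = path.length := by omega
              have h2 : (path ++ [e])[i + 1]'(by simp; omega) = e := by
                simp only [hi1, List.getElem_concat_length]
              have h1 : (path ++ [e])[i]'(by omega) = u := by
                rw [List.getElem_append_left (by omega), hulast]
                congr 1; omega
              rw [h1, h2, hE]
          have hlast' : (path ++ [e]).getLast hne' = e := by
            simp
          have := ih fB' (path ++ [e]) hne' hnd' hb' hchain'
            (by simp; omega) (by simp; omega)
            (PySem.List.pyGetD edges e (-1)) (by rw [hlast']; exact hE2)
          rw [hlast'] at this
          simpa using this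

-- A's loop only ever writes values ≥ 0, so a slot once ≥ 0 stays ≥ 0
lemma loopA_keep (edges : List Int) (j : Int) :
    ∀ (f : Nat) (dist : List Int) (u : Int),
      0 < dist.length → -(dist.length : Int) ≤ j → j < dist.length →
      (∀ x ∈ dist, -1 ≤ x) → 0 ≤ PySem.List.pyGetD dist j (-1) →
      0 ≤ PySem.List.pyGetD (BFS_loopA f edges dist u) j (-1) := by
  intro f
  induction f with
  | zero => intro dist u _ _ _ _ hj; exact hj
  | succ f ih =>
      intro dist u hpos hj0 hj1 hmem hj
      cases hE : PySem.List.pyGet? edges u with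
      | none => simpa [BFS_loopA, hE] using hj
      | some e =>
        cases hDe : PySem.List.pyGet? dist e with
        | none => simpa [BFS_loopA, hE, hDe] using hj
        | some de =>
          simp only [BFS_loopA, hE, hDe]
          by_cases h1 : de = -1
          · by_cases h2 : e = -1
            · simpa [h1, h2] using hj
            · rw [if_pos h1, if_neg h2]
              have heb := inRange_of_pyGet?_some dist e de hDe
              have hv : 0 ≤ PySem.List.pyGetD dist u (-1) + 1 := by
                cases hU : PySem.List.pyGet? dist u with
                | none => rw [pyGetD_eq_of_pyGet?_none dist u (-1) hU]; omega
                | some x =>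
                  rw [pyGetD_eq_of_pyGet?_some dist u (-1) x hU]
                  have := hmem x (PySem.List.mem_of_pyGet?_eq_some dist hU)
                  omega
              set v := PySem.List.pyGetD dist u (-1) + 1 with hvdef
              have hlen2 : (PySem.List.pySetD dist e v).length = dist.length :=
                PySem.List.length_pySetD ..
              refine ih (PySem.List.pySetD dist e v) e (by omega)
                (by omega) (by omega) ?_ ?_
              · intro x hx
                have heb2 := mod_bounds dist.length e hpos
                rw [pySetD_mod dist e v dist.length rfl hpos heb.1 heb.2,
                  PySem.List.pySetD_of_nonneg _ _ heb2.1] at hx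
                rcases List.mem_or_eq_of_mem_set hx with h | h
                · exact hmem x h
                · omega
              · rw [getD_set_wrap dist.length dist e j v rfl hpos heb.1 heb.2 hj0 hj1]
                split_ifs
                · exact hv
                · exact hj
          · simpa [h1] using hj

-- ===== VERDICT (by name: the statement is the Claim_ definition above) =====
theorem BFS_spec : Claim_unchanged_BFS := by
  intro edges u _ hpre hnd
  obtain ⟨hn, hu0, hu1, -⟩ := hpre
  unfold D_BFS at hnd
  unfold BFS BFS_alt
  have hune : u ≠ -1 := hnd
  have hE : PySem.List.pyGet? edges u = some (PySem.List.pyGetD edges u (-1)) :=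
    pyGet?_eq_some_pyGetD edges u (-1) hu0 hu1 hn
  have hinit : PySem.List.pySetD (List.replicate edges.length (-1 : Int)) u 0
      = fillFrom (List.replicate edges.length (-1 : Int)) 0 [u] := rfl
  have hrep : PySem.List.pyGet? (List.replicate edges.length (-1 : Int)) u
      = some (-1) := by
    have hub := mod_bounds edges.length u hn
    rw [pyGet?_mod _ u edges.length (by simp) hn hu0 hu1,
      PySem.List.pyGet?_eq_some_getElem _ hub.1 (by simp; omega)]
    simp
  simp only [BFS_orbit, if_neg hune, hE, PySem.List.enumerate_cons, List.foldl_cons]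
  have hstep0 : BFS_fillstep (List.replicate edges.length (-1 : Int)) (0, u)
      = fillFrom (List.replicate edges.length (-1 : Int)) 0 [u] := by
    simp [BFS_fillstep, hrep, fillFrom]
  rw [hstep0, hinit]
  have := main_loop edges (edges.length + 1) edges.length [u] (by simp)
    (by simp) (by intro x hx; simp only [List.mem_singleton] at hx; subst hx; exact ⟨hu0, hu1⟩)
    (by intro i hi; simp at hi) (by simp) (by simp)
    (PySem.List.pyGetD edges u (-1)) (by simpa using hE)
  simpa using this

theorem BFS_changed : Claim_changed_BFS := by
  unfold Claim_changed_BFS; decide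

theorem BFS_tight : Claim_exact_BFS := by
  intro edges u _ hpre hd
  obtain ⟨hn, _, _, -⟩ := hpre
  unfold D_BFS at hd
  subst hd
  set n := edges.length with hn'
  -- B returns the all -1 vector
  have hB : BFS_alt edges (-1) = List.replicate n (-1 : Int) := by
    have ho : BFS_orbit (edges.length + 1) edges (-1) = [] := by
      simp [BFS_orbit]
    simp [BFS_alt, ho, PySem.List.enumerate_nil, hn']
  -- A's initial write lands on slot n-1, which then stays ≥ 0
  intro heq
  have hj0 : -(n : Int) ≤ (n : Int) - 1 := by omega
  have hj1 : (n : Int) - 1 < n := by omega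
  have hD0 : PySem.List.pyGetD
      (PySem.List.pySetD (List.replicate n (-1 : Int)) (-1) 0) ((n : Int) - 1) (-1)
      = 0 := by
    have hmods : PySem.Int.mod ((n : Int) - 1) n = PySem.Int.mod (-1) n := by
      rw [mod_neg_one n hn, mod_idem n _ hn (by omega) (by omega)]
    rw [getD_set_wrap n (List.replicate n (-1 : Int)) (-1) ((n : Int) - 1) 0
      (by simp) hn (by omega) (by omega) hj0 hj1, if_pos hmods]
  have hmem0 : ∀ x ∈ PySem.List.pySetD (List.replicate n (-1 : Int)) (-1) 0,
      -1 ≤ x := by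
    intro x hx
    have hb := mod_bounds n (-1) hn
    rw [pySetD_mod _ (-1) 0 n (by simp) hn (by omega) (by omega),
      PySem.List.pySetD_of_nonneg _ _ hb.1] at hx
    rcases List.mem_or_eq_of_mem_set hx with h | h
    · have := List.eq_of_mem_replicate h
      omega
    · omega
  have hkeep := loopA_keep edges ((n : Int) - 1) (n + 1)
    (PySem.List.pySetD (List.replicate n (-1 : Int)) (-1) 0) (-1)
    (by rw [PySem.List.length_pySetD]; simpa using hn)
    (by rw [PySem.List.length_pySetD]; simpa using hj0)
    (by rw [PySem.List.length_pySetD]; simpa using hj1)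
    hmem0 (by rw [hD0])
  have hA : BFS edges (-1)
      = BFS_loopA (n + 1) edges
          (PySem.List.pySetD (List.replicate n (-1 : Int)) (-1) 0) (-1) := rfl
  rw [hA, hB] at heq
  rw [heq] at hkeep
  rw [PySem.List.pyGetD_eq_getElem _ _ (by omega)
    (by simp only [List.length_replicate]; omega)] at hkeep
  simp only [List.getElem_replicate] at hkeep
  omega
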